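-- pv_equiv track=rewrite | github.com/EliFrun/my-leetcode-submissions | submissions/4154-maximum-bitwise-and-after-increment-operations/solution.py | maximumAND
-- ===== SOURCE A (Python) =====
-- from typing import List
--
-- def maximumAND(nums: List[int], k: int, m: int) -> int:
--     bits = 0
--     n = max(nums)
--     while n > 0:
--         bits += 1
--         n >>= 1
--     ret = 0
--     for i in range(32, -1, -1):
--         nums.sort(reverse=True)
--         if nums[m - 1] >= 1 << i:
--             ret |= 1 << i
--             nums = [x & ((1 << i) - 1) for x in nums if x >= 1 << i]
--         else:
--             needed = 0
--             for j in range(m):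
--                 needed += max(0, (1 << i) - nums[j])
--             if needed <= k:
--                 for j in range(m):
--                     if nums[j] < (1<<i):
--                         nums[j] = 1 << i
--                 k -= needed
--                 ret |= 1 << i
--                 nums = [x & ((1 << i) - 1) for x in nums if x >= 1 << i]
--             else:
--                 nums = [x & ((1 << i) - 1) for x in nums]
--
--
--     return ret
-- ===== SOURCE B (Python) =====
-- def _cost(x, t):
--     # minimum total increments for x to acquire every bit of the mask t,
--     # simulated bit by bit from the top (bits outside t are discarded)
--     c = 0
--     v = x
--     for i in range(32, -1, -1):
--         p = 1 << i
--         if t & p: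
--             if v >= p:
--                 v -= p
--             else:
--                 c += p - v
--                 v = 0
--         else:
--             v &= p - 1
--     return c
--
--
-- def maximumAND(nums, k, m):
--     if not nums or m < 1 or m > len(nums) or k < 0:
--         raise ValueError("need a nonempty list, 1 <= m <= len(nums) and k >= 0")
--     ret = 0
--     for i in range(32, -1, -1):
--         cand = ret | (1 << i)
--         costs = sorted(_cost(x, cand) for x in nums)
--         if sum(costs[:m]) <= k:
--             ret = cand
--     return ret
-- ===== Notes on version B (the rewrite author's own statement) =====
-- stated objective: alternative
-- what changed: A is a stateful greedy that re-sorts, boosts in place, filters and masks a shrinking candidate list while decrementing the remaining budget k; B keeps no collection state at all: per bit it forms the candidate mask ret|bit and recomputes, for each ORIGINAL element independently, the exact increment cost to cover that whole mask (a per-element bitwise simulation), accepting the bit iff the sum of the m cheapest costs fits in the full original budget.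
-- outside the precondition, e.g. on maximumAND([3, 3], -1, 2): A returns 3, B raises ValueError
import Mathlib
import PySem

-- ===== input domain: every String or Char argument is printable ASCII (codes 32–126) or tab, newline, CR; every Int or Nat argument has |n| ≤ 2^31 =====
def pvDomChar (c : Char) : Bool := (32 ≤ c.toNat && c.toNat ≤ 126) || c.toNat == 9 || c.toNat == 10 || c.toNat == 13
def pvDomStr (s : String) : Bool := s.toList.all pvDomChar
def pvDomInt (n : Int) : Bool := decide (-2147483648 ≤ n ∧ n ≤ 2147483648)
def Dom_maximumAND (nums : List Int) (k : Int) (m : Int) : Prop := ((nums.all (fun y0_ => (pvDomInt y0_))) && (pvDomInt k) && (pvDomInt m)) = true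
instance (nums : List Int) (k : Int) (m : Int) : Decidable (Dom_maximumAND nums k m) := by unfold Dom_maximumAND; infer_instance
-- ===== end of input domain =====

-- B replaces A's stateful greedy (re-sort, in-place boost, filter and mask a shrinking
-- list while decrementing the budget) by a stateless one: per bit it recomputes, for
-- each ORIGINAL element, the exact increment cost to cover the whole candidate mask,
-- and accepts the bit iff the m cheapest costs fit in the full original budget;
-- objective: alternative.  Note: Python A sorts `nums` in place (a caller-visible
-- mutation); the equivalence proved here is about the return value only — B does not
-- mutate its argument.

-- ===== PORT A =====
-- termination helper for the bit-length while-loop (cited by pvBits' decreasing_by)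
theorem pvShiftRight_toNat_lt (n : Int) (h : 0 < n) : (n >>> (1:Nat)).toNat < n.toNat := by
  rw [Int.shiftRight_eq_div_pow]; omega

-- while n > 0: bits += 1; n >>= 1   (the result is unused by A, as in the Python)
def pvBits (n : Int) (bits : Int) : Int :=
  if h : 0 < n then pvBits (n >>> (1:Nat)) (bits + 1) else bits
termination_by n.toNat
decreasing_by exact pvShiftRight_toNat_lt n h

-- one iteration of A's `for i in range(32, -1, -1)` loop; state = (nums, k, ret);
-- i ∈ [0,32] so `1 << i` is ported as `1 <<< i.toNat` (exact there)
def pvStepA (m : Int) (st : List Int × Int × Int) (i : Int) : List Int × Int × Int :=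
  let s := PySem.List.sorted st.1 (fun x => x) true          -- nums.sort(reverse=True)
  let p : Int := (1 : Int) <<< i.toNat
  (PySem.List.pyGet? s (m - 1)).elim (s, st.2.1, st.2.2)    -- none = IndexError (outside Pre_)
    (fun v =>
    if p ≤ v then
      ((s.filter (fun x => decide (p ≤ x))).map (fun x => PySem.Int.band x (p - 1)),
       st.2.1, PySem.Int.bor st.2.2 p)
    else
      -- needed = sum over j in range(m) of max(0, (1<<i) - nums[j])
      let needed := (PySem.List.pyRange 0 m 1).foldl
        (fun acc j => acc + max 0 (p - PySem.List.pyGetD s j 0)) 0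
      if needed ≤ st.2.1 then
        -- for j in range(m): if nums[j] < (1<<i): nums[j] = 1 << i
        let boosted := (PySem.List.pyRange 0 m 1).foldl
          (fun ns j => if PySem.List.pyGetD ns j 0 < p then PySem.List.pySetD ns j p else ns) s
        ((boosted.filter (fun x => decide (p ≤ x))).map (fun x => PySem.Int.band x (p - 1)),
         st.2.1 - needed, PySem.Int.bor st.2.2 p)
      else
        (s.map (fun x => PySem.Int.band x (p - 1)), st.2.1, st.2.2))

def maximumAND (nums : List Int) (k : Int) (m : Int) : Int :=
  -- bits/n: dead code in A except that max([]) raises ValueError (outside Pre_)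
  let _bits := match PySem.List.max? nums (fun x => x) with
    | none => (0 : Int)
    | some n => pvBits n 0
  ((PySem.List.pyRange 32 (-1) (-1)).foldl (fun st i => pvStepA m st i) (nums, k, 0)).2.2

-- ===== PORT B =====
-- one bit of B's per-element cost simulation: state = (c, v)
def pvCostStep (t : Int) (s : Int × Int) (i : Int) : Int × Int :=
  let p : Int := (1 : Int) <<< i.toNat
  if PySem.Int.band t p ≠ 0 then
    (if p ≤ s.2 then (s.1, s.2 - p) else (s.1 + (p - s.2), 0))
  else (s.1, PySem.Int.band s.2 (p - 1))

-- _cost(x, t): minimum increments for x to acquire every bit of t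
def pvCost (t : Int) (x : Int) : Int :=
  ((PySem.List.pyRange 32 (-1) (-1)).foldl (fun s i => pvCostStep t s i) (0, x)).1

-- one bit of B's greedy over candidate masks
def pvAltStep (nums : List Int) (k : Int) (m : Int) (ret : Int) (i : Int) : Int :=
  let cand := PySem.Int.bor ret ((1 : Int) <<< i.toNat)
  let costs := PySem.List.sorted (nums.map (fun x => pvCost cand x)) (fun c => c) false
  if (PySem.List.slice costs none (some m)).sum ≤ k then cand else ret

def maximumAND_alt (nums : List Int) (k : Int) (m : Int) : Int :=
  if nums = [] ∨ m < 1 ∨ (nums.length : Int) < m ∨ k < 0 then 0  -- ValueError (outside Pre_)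
  else (PySem.List.pyRange 32 (-1) (-1)).foldl (fun ret i => pvAltStep nums k m ret i) 0

-- ===== PRECONDITION & SPEC =====
-- Pre_ keeps the task's natural domain: a nonempty list, 1 ≤ m ≤ len(nums) (choose m
-- elements) and a nonnegative increment budget k.  Outside it A raises (ValueError on
-- [], IndexError for m > len and for m ≤ 0 with k ≥ 0), except that for k < 0 — a
-- meaningless negative operation budget — A still returns the AND reachable with no
-- increments at all, while B (which validates its domain) raises ValueError.
def Pre_maximumAND (nums : List Int) (k : Int) (m : Int) : Prop :=
  nums ≠ [] ∧ 1 ≤ m ∧ m ≤ nums.length ∧ 0 ≤ k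
instance (nums : List Int) (k : Int) (m : Int) : Decidable (Pre_maximumAND nums k m) := by
  unfold Pre_maximumAND; infer_instance

def pvWitness_maximumAND : List Int × Int × Int := ([3, 1, 2], 4, 2)

def Spec_maximumAND (nums : List Int) (k : Int) (m : Int) (out : Int) : Prop := out = maximumAND_alt nums k m
instance (nums : List Int) (k : Int) (m : Int) (out : Int) : Decidable (Spec_maximumAND nums k m out) := by unfold Spec_maximumAND; infer_instance

-- ===== CLAIM (what is proved, stated in full; the proofs are below) =====
def Claim_equal_maximumAND : Prop := ∀ (nums : List Int) (k : Int) (m : Int), Dom_maximumAND nums k m → Pre_maximumAND nums k m → Spec_maximumAND nums k m (maximumAND nums k m)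

-- ===== LEMMAS AND PROOFS =====

-- the bit lists: revBits n = [n-1, …, 0] (bits still to process), aboveBits n = [32, …, n]
def revBits (n : Nat) : List Int := PySem.List.pyRange ((n : Int) - 1) (-1) (-1)
def aboveBits (n : Nat) : List Int := PySem.List.pyRange 32 ((n : Int) - 1) (-1)

-- machine state of x after the processed bits [32, …, n] of mask t
def pvPre (t : Int) (x : Int) (n : Nat) : Int × Int :=
  (aboveBits n).foldl (fun s i => pvCostStep t s i) (0, x)

-- g-cost of a tracked triple (x, c, v) at bit n with bit value p
def pvG (p : Int) (t : Int × Int × Int) : Int := t.2.1 + max 0 (p - t.2.2)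

-- the loop invariant tying A's state to the tracked per-element machine states
def pvInv (nums : List Int) (k m : Int) (n : Nat) (st : List Int × Int × Int) : Prop :=
  ∃ (sel others : List (Int × Int × Int)) (RN : Nat),
    st.2.2 = (RN : Int) ∧
    RN < 2 ^ 33 ∧ 2 ^ n ∣ RN ∧ n ≤ 33 ∧
    nums.Perm (sel.map (·.1) ++ others.map (·.1)) ∧
    st.1.Perm (sel.map (·.2.2)) ∧
    st.2.1 = k - (sel.map (·.2.1)).sum ∧
    0 ≤ st.2.1 ∧
    1 ≤ m ∧
    m ≤ (sel.length : Int) ∧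
    (∀ t ∈ sel ++ others, pvPre (RN : Int) t.1 n = (t.2.1, t.2.2)) ∧
    (∀ t ∈ sel ++ others, t.2.2 < 2 ^ n) ∧
    (∀ t ∈ sel ++ others, 0 ≤ t.2.1) ∧
    ((∀ t ∈ sel, t.2.1 = 0) ∨ (sel.length : Int) = m) ∧
    (∀ d ∈ others, 1 ≤ d.2.1 ∧ d.2.2 = 0 ∧ ∀ s ∈ sel, s.2.1 ≤ d.2.1) ∧
    (others = [] ∨ ∀ s ∈ sel, 0 ≤ s.2.2)

theorem pvRevBits_succ (n : Nat) : revBits (n + 1) = (n : Int) :: revBits n := by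
  unfold revBits
  push_cast
  rw [show (n : Int) + 1 - 1 = n by ring]
  rw [PySem.List.pyRange_neg_one_cons (by omega)]

theorem pvRevBits_zero : revBits 0 = [] := by
  unfold revBits
  rw [PySem.List.pyRange_neg_one_eq_nil (by norm_num)]

theorem pvAbove_split (n : Nat) (hn : n ≤ 33) :
    PySem.List.pyRange 32 (-1) (-1) = aboveBits n ++ revBits n := by
  unfold aboveBits revBits
  rw [PySem.List.pyRange_neg_one_eq_reverse, PySem.List.pyRange_neg_one_eq_reverse,
      PySem.List.pyRange_neg_one_eq_reverse]
  rw [← List.reverse_append]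
  congr 1
  rw [show (-1 : Int) + 1 = 0 by ring, show ((n:Int) - 1) + 1 = (n:Int) by ring,
      show (32 : Int) + 1 = 33 by ring]
  exact PySem.List.pyRange_one_append 0 (n : Int) 33 (by omega) (by omega)

theorem pvAbove_snoc (n : Nat) (hn : n ≤ 32) :
    aboveBits n = aboveBits (n + 1) ++ [(n : Int)] := by
  unfold aboveBits
  rw [PySem.List.pyRange_neg_one_eq_reverse, PySem.List.pyRange_neg_one_eq_reverse]
  rw [show ((n:Int) - 1) + 1 = (n:Int) by ring,
      show ((((n+1):Nat):Int) - 1) + 1 = (n:Int) + 1 by push_cast; ring,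
      show (32 : Int) + 1 = 33 by ring]
  rw [show PySem.List.pyRange (n:Int) 33 1 = (n:Int) :: PySem.List.pyRange ((n:Int)+1) 33 1 from PySem.List.pyRange_one_cons (by omega)]
  simp



theorem pvTestBit_mul_add (q b j i : Nat) (hb : b < 2^i) :
    (2^i*q + b).testBit j = if j < i then b.testBit j else q.testBit (j-i) :=
  Nat.testBit_two_pow_mul_add q hb j

theorem pvRN_add_testBit (q n j : Nat) :
    (2^(n+1)*q + 2^n).testBit j =
      if j = n then true else if j < n then false else (2^(n+1)*q + 0).testBit j := by
  rw [pvTestBit_mul_add q (2^n) j (n+1) (by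
    have := Nat.pow_lt_pow_right (a := 2) (by norm_num) (show n < n + 1 by omega)
    omega)]
  rw [pvTestBit_mul_add q 0 j (n+1) (by positivity)]
  rcases lt_trichotomy j n with h | h | h
  · simp [Nat.testBit_two_pow, h, show j < n + 1 by omega, show n ≠ j by omega,
      show ¬ j = n by omega]
  · simp [h, Nat.testBit_two_pow_self, show n < n + 1 by omega]
  · simp [show ¬ j < n + 1 by omega, show ¬ j = n by omega, show ¬ j < n by omega]

theorem pvLor_disjoint (q n : Nat) : (2^(n+1)*q) ||| 2^n = 2^(n+1)*q + 2^n := by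
  apply Nat.eq_of_testBit_eq
  intro j
  rw [Nat.testBit_lor, pvRN_add_testBit,
      show 2^(n+1)*q = 2^(n+1)*q + 0 from (Nat.add_zero _).symm,
      pvTestBit_mul_add q 0 j (n+1) (by positivity)]
  rcases lt_trichotomy j n with h | h | h
  · simp [Nat.testBit_two_pow, h, show j < n + 1 by omega, show n ≠ j by omega,
      show ¬ j = n by omega]
  · simp [h, Nat.testBit_two_pow_self, show n < n + 1 by omega]
  · simp [Nat.testBit_two_pow, show ¬ j < n + 1 by omega, show ¬ j = n by omega,
      show ¬ j < n by omega, show n ≠ j by omega]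

theorem pvBand_pow_eq_zero_of_lt (RN : Nat) (n j : Nat) (hd : 2^(n+1) ∣ RN) (hj : j ≤ n) :
    RN &&& 2^j = 0 := by
  obtain ⟨q, rfl⟩ := hd
  rw [Nat.and_two_pow,
      show 2^(n+1)*q = 2^(n+1)*q + 0 from (Nat.add_zero _).symm,
      pvTestBit_mul_add q 0 j (n+1) (by positivity)]
  simp [show j < n + 1 by omega]

theorem pvBand_add_pow_high (RN : Nat) (n j : Nat) (hd : 2^(n+1) ∣ RN) (hj : n < j) :
    (RN + 2^n) &&& 2^j = RN &&& 2^j := by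
  obtain ⟨q, rfl⟩ := hd
  rw [Nat.and_two_pow, Nat.and_two_pow]
  congr 2
  rw [pvRN_add_testBit]
  simp [show ¬ j = n by omega, show ¬ j < n by omega]

theorem pvBand_add_pow_self (RN : Nat) (n : Nat) (hd : 2^(n+1) ∣ RN) :
    (RN + 2^n) &&& 2^n = 2^n := by
  obtain ⟨q, rfl⟩ := hd
  rw [Nat.and_two_pow, pvRN_add_testBit]
  simp

-- Int-level consequences (p = 2^n as Int)

theorem pvPowCast (n : Nat) : ((1:Int) <<< n) = ((2^n : Nat) : Int) := by
  rw [Int.shiftLeft_eq]; push_cast; ring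

theorem pvBandLe (v : Int) (n : Nat) :
    0 ≤ PySem.Int.band v (((2^n : Nat) : Int) - 1) ∧
    PySem.Int.band v (((2^n : Nat) : Int) - 1) ≤ ((2^n : Nat) : Int) - 1 := by
  have h1 : ((2^n : Nat) : Int) - 1 = ((2^n - 1 : Nat) : Int) := by
    have : 1 ≤ 2^n := Nat.one_le_two_pow
    push_cast [this]; ring
  rw [h1]
  unfold PySem.Int.band
  split
  · rw [if_pos (by positivity)]
    constructor
    · positivity
    · have := Nat.and_le_right (n := (v.toNat)) (m := ((2^n - 1 : Nat) : Int).toNat)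
      have h2 : 1 ≤ 2^n := Nat.one_le_two_pow
      omega
  · rw [if_pos (by positivity)]
    have h2 : 1 ≤ 2^n := Nat.one_le_two_pow
    have h3 : ((2^n - 1 : Nat) : Int).toNat = 2^n - 1 := by omega
    constructor
    · positivity
    · have : ((2^n - 1 : Nat) : Int).toNat - (((2^n - 1 : Nat) : Int).toNat &&& (-v - 1).toNat) ≤ 2^n - 1 := by
        omega
      omega

theorem pvBandSub (v : Int) (n : Nat) (h1 : ((2^n : Nat) : Int) ≤ v) (h2 : v < ((2^(n+1) : Nat) : Int)) :
    PySem.Int.band v (((2^n : Nat) : Int) - 1) = v - ((2^n : Nat) : Int) := by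
  have hmono : (2:Nat)^n ≤ 2^(n+1) := Nat.pow_le_pow_right (by norm_num) (by omega)
  have h0 : 0 ≤ v := le_trans (by positivity) h1
  have h1' : ((2^n : Nat) : Int) - 1 = ((2^n - 1 : Nat) : Int) := by
    have : 1 ≤ 2^n := Nat.one_le_two_pow
    push_cast [this]; ring
  rw [h1']
  rw [PySem.Int.band_of_nonneg h0 (by positivity)]
  have h3 : ((2^n - 1 : Nat) : Int).toNat = 2^n - 1 := by
    have : 1 ≤ 2^n := Nat.one_le_two_pow
    omega
  rw [h3, Nat.and_two_pow_sub_one_eq_mod]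
  have hv : v.toNat < 2^(n+1) := by omega
  have hv2 : 2^n ≤ v.toNat := by omega
  have hstep : v.toNat % 2^n = (v.toNat - 2^n) % 2^n := Nat.mod_eq_sub_mod hv2
  have hlt : v.toNat - 2^n < 2^n := by
    rw [Nat.pow_succ] at hv
    omega
  rw [hstep, Nat.mod_eq_of_lt hlt]
  omega

theorem pvCostStep_nat (t : Int) (s : Int × Int) (j : Nat) :
    pvCostStep t s (j : Int) =
      if PySem.Int.band t ((2^j : Nat) : Int) ≠ 0 then
        (if ((2^j : Nat) : Int) ≤ s.2 then (s.1, s.2 - ((2^j : Nat) : Int))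
         else (s.1 + (((2^j : Nat) : Int) - s.2), 0))
      else (s.1, PySem.Int.band s.2 (((2^j : Nat) : Int) - 1)) := by
  unfold pvCostStep
  rw [show ((j : Int)).toNat = j from Int.toNat_natCast j, pvPowCast]

-- bits below n of a mask divisible by 2^n never touch the cost component

theorem pvLowBits (TN : Nat) (n : Nat) (hd : 2^n ∣ TN) (s : Int × Int) :
    (((revBits n).foldl (fun s i => pvCostStep ((TN : Nat) : Int) s i) s)).1 = s.1 := by
  induction n generalizing s with
  | zero => rw [pvRevBits_zero]; simp
  | succ n ih =>
    rw [pvRevBits_succ]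
    simp only [List.foldl_cons]
    rw [pvCostStep_nat]
    rw [if_neg (by
      simp only [PySem.Int.band_natCast, ne_eq, not_not]
      exact_mod_cast congrArg (Nat.cast : Nat → Int) (pvBand_pow_eq_zero_of_lt TN n n hd (le_refl n)))]
    exact ih (dvd_trans (pow_dvd_pow 2 (by omega)) hd) _

-- the processed bits [32,…,n+1] of ret|2^n are those of ret

theorem pvPre_congr (RN : Nat) (n : Nat) (hd : 2^(n+1) ∣ RN) (x : Int) :
    pvPre (((RN + 2^n : Nat)) : Int) x (n+1) = pvPre ((RN : Nat) : Int) x (n+1) := by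
  unfold pvPre
  apply PySem.List.foldl_congr_mem
  intro acc j hj
  have hj' : ((n:Int)+1) - 1 < j ∧ j ≤ 32 := by
    have := (PySem.List.mem_pyRange_neg_one).mp (by
      unfold aboveBits at hj
      push_cast at hj ⊢
      exact hj)
    push_cast at this
    omega
  have hjn : n < j.toNat := by omega
  have hj0 : j = ((j.toNat : Nat) : Int) := by omega
  rw [hj0, pvCostStep_nat, pvCostStep_nat]
  rw [PySem.Int.band_natCast, PySem.Int.band_natCast,
      pvBand_add_pow_high RN n j.toNat hd hjn]

theorem pvPre_snoc (T : Int) (x : Int) (n : Nat) (hn : n ≤ 32) :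
    pvPre T x n = pvCostStep T (pvPre T x (n+1)) (n : Int) := by
  unfold pvPre
  rw [pvAbove_snoc n hn, List.foldl_append]
  simp

-- the cost of x for candidate mask ret|2^n, in terms of the tracked machine state

theorem pvCost_eval (RN : Nat) (n : Nat) (hn : n ≤ 32) (hd : 2^(n+1) ∣ RN) (x : Int) :
    pvCost ((RN + 2^n : Nat) : Int) x =
      (pvPre ((RN : Nat) : Int) x (n+1)).1 +
        max 0 (((2^n : Nat) : Int) - (pvPre ((RN : Nat) : Int) x (n+1)).2) := by
  unfold pvCost
  rw [pvAbove_split n (by omega), List.foldl_append]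
  have h1 : (aboveBits n).foldl (fun s i => pvCostStep ((RN + 2^n : Nat) : Int) s i) (0, x)
      = pvCostStep ((RN + 2^n : Nat) : Int) (pvPre ((RN : Nat) : Int) x (n+1)) (n : Int) := by
    have := pvPre_snoc ((RN + 2^n : Nat) : Int) x n hn
    unfold pvPre at this ⊢
    rw [this]
    congr 1
    exact congrArg (fun z => z) (by
      have := pvPre_congr RN n hd x
      unfold pvPre at this
      exact this)
  rw [h1, pvCostStep_nat]
  rw [if_pos (by
    rw [PySem.Int.band_natCast, pvBand_add_pow_self RN n hd]
    positivity)]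
  set st := pvPre ((RN : Nat) : Int) x (n+1)
  by_cases hv : ((2^n : Nat) : Int) ≤ st.2
  · rw [if_pos hv]
    rw [pvLowBits (RN + 2^n) n (by
      refine Dvd.dvd.add (dvd_trans (pow_dvd_pow 2 (by omega)) hd) dvd_rfl)]
    have : max 0 (((2^n : Nat) : Int) - st.2) = 0 := by omega
    omega
  · rw [if_neg hv]
    rw [pvLowBits (RN + 2^n) n (by
      refine Dvd.dvd.add (dvd_trans (pow_dvd_pow 2 (by omega)) hd) dvd_rfl)]
    have : max 0 (((2^n : Nat) : Int) - st.2) = ((2^n : Nat) : Int) - st.2 := by omega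
    omega

-- a descending list splits at its count of elements ≥ p

theorem pvDescSplit (s : List Int) (p : Int) (h : s.Pairwise (fun a b => b ≤ a)) :
    s.filter (fun x => decide (p ≤ x)) = s.take (s.countP (fun x => decide (p ≤ x))) ∧
    s.filter (fun x => decide (x < p)) = s.drop (s.countP (fun x => decide (p ≤ x))) := by
  induction s with
  | nil => simp
  | cons a t ih =>
    rw [List.pairwise_cons] at h
    obtain ⟨ha, ht⟩ := h
    obtain ⟨ih1, ih2⟩ := ih ht
    by_cases hp : p ≤ a
    · simp [List.countP_cons, List.filter_cons, hp, ih1, ih2,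
        show ¬ a < p from not_lt.mpr hp]
    · have hap : a < p := not_le.mp hp
      have hzc : (a :: t).countP (fun x => decide (p ≤ x)) = 0 := by
        rw [List.countP_eq_zero]
        intro x hx
        rcases List.mem_cons.mp hx with rfl | hx'
        · simpa using hap
        · simpa using lt_of_le_of_lt (ha x hx') hap
      have hf : t.filter (fun x => decide (x < p)) = t := by
        rw [List.filter_eq_self]
        intro x hx
        simpa using lt_of_le_of_lt (ha x hx) hap
      simp only [hzc, List.drop_zero, List.take_zero, List.filter_cons]
      constructor
      · simp [hp]
        intro x hx
        exact lt_of_le_of_lt (ha x hx) hap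
      · simp [hap, hf]

theorem pvDescIndex (s : List Int) (p : Int) (h : s.Pairwise (fun a b => b ≤ a))
    (j : Nat) (hj : j < s.length) :
    (p ≤ s[j] ↔ j < s.countP (fun x => decide (p ≤ x))) := by
  obtain ⟨h1, h2⟩ := pvDescSplit s p h
  set c := s.countP (fun x => decide (p ≤ x)) with hc
  have hcle : c ≤ s.length := List.countP_le_length
  constructor
  · intro hge
    by_contra hlt
    rw [Nat.not_lt] at hlt
    have hmem : s[j] ∈ s.drop c := by
      have h3 : (s.drop c)[j - c]'(by simp; omega) = s[j] := by
        rw [List.getElem_drop]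
        congr 1
        omega
      rw [← h3]
      exact List.getElem_mem _
    rw [← h2] at hmem
    have := List.of_mem_filter hmem
    simp at this; omega
  · intro hlt
    have hmem : s[j] ∈ s.take c := by
      exact List.mem_take_iff_getElem.mpr ⟨j, by omega, rfl⟩
    rw [← h1] at hmem
    have := List.of_mem_filter hmem
    simpa using this

theorem pvSetD_natCast {α : Type} (xs : List α) (n : Nat) (v : α) (h : n < xs.length) :
    PySem.List.pySetD xs (n : Int) v = xs.set n v := by
  simp [PySem.List.pySetD, PySem.List.pySet?, PySem.List.pyIdx?, h]

-- the boost loop `for j in range(m): if s[j] < p: s[j] = p` maps the first m entries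

theorem pvBoostEq (p : Int) (s : List Int) (mN : Nat) (h : mN ≤ s.length) :
    (PySem.List.pyRange 0 (mN : Int) 1).foldl
      (fun ns j => if PySem.List.pyGetD ns j 0 < p then PySem.List.pySetD ns j p else ns) s
    = (s.take mN).map (fun x => if x < p then p else x) ++ s.drop mN := by
  induction mN with
  | zero => simp [show PySem.List.pyRange 0 ((0:Nat) : Int) 1 = [] from by decide]
  | succ n ih =>
    have hn : n ≤ s.length := by omega
    have hnlt : n < s.length := by omega
    have hrange : PySem.List.pyRange 0 ((n+1 : Nat) : Int) 1
        = PySem.List.pyRange 0 (n : Nat) 1 ++ [(n : Int)] := by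
      have := PySem.List.pyRange_one_succ_right (a := 0) (b := (n : Int)) (by positivity)
      push_cast
      push_cast at this
      exact this
    rw [hrange, List.foldl_append, ih hn]
    set A := (s.take n).map (fun x => if x < p then p else x) with hA
    have hAlen : A.length = n := by simp [hA, hn]
    have hgetL : PySem.List.pyGetD (A ++ s.drop n) ((n : Nat) : Int) 0 = s[n] := by
      rw [PySem.List.pyGetD_natCast]
      rw [List.getD_eq_getElem _ _ (by simp [hAlen]; omega)]
      rw [List.getElem_append_right (by omega)]
      simp [hAlen, List.getElem_drop]
    simp only [List.foldl_cons, List.foldl_nil, hgetL]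
    have hdrop : s.drop n = s[n] :: s.drop (n+1) := List.drop_eq_getElem_cons hnlt
    have htake : s.take (n+1) = s.take n ++ [s[n]] := by
      rw [List.take_add_one]
      simp [List.getElem?_eq_getElem hnlt]
    by_cases hlt : s[n] < p
    · rw [if_pos hlt]
      rw [pvSetD_natCast _ _ _ (by simp [hAlen]; omega)]
      rw [List.set_append]
      rw [if_neg (by omega)]
      rw [hAlen, Nat.sub_self, hdrop, List.set_cons_zero]
      rw [htake, List.map_append, hA]
      simp [hlt]
    · rw [if_neg hlt]
      rw [htake, List.map_append, hdrop]
      simp [hA, if_neg hlt]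

theorem pvBandPow (n : Nat) : PySem.Int.band ((2:Int) ^ n) ((2:Int) ^ n - 1) = 0 := by
  have h1 : ((2:Int) ^ n) = ((2 ^ n : Nat) : Int) := by push_cast; ring
  have h2 : ((2:Int) ^ n - 1) = ((2 ^ n - 1 : Nat) : Int) := by
    have : 1 ≤ 2 ^ n := Nat.one_le_two_pow
    push_cast [this]; ring
  rw [h2, h1, PySem.Int.band_natCast]
  norm_num [Nat.and_two_pow_sub_one_eq_mod]

-- descending sort of the tracked values is the value image of the descending triple sort

theorem pvSortedTriples (l : List (Int × Int × Int)) (vals : List Int)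
    (hperm : vals.Perm (l.map (·.2.2))) :
    PySem.List.sorted vals (fun x => x) true
      = (PySem.List.sorted l (fun t => t.2.2) true).map (·.2.2) := by
  apply PySem.List.eq_of_perm_of_pairwise_le_of_injective (key := fun x : Int => -x)
    (fun a b hab => by simpa using hab)
  · refine (PySem.List.sorted_perm _ _ _).trans (hperm.trans ?_)
    exact ((PySem.List.sorted_perm l (fun t => t.2.2) true).map _).symm
  · exact (PySem.List.sorted_pairwise_rev _ _).imp (by intro a b hab; simpa using hab)
  · rw [List.pairwise_map]
    exact (PySem.List.sorted_pairwise_rev _ _).imp (by intro a b hab; simpa using hab)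

-- crossing pairs of take/drop inherit the pairwise relation

theorem pvPairwiseTakeDrop {α : Type} {r : α → α → Prop} (l : List α) (n : Nat)
    (h : l.Pairwise r) : ∀ a ∈ l.take n, ∀ b ∈ l.drop n, r a b := by
  have := (List.pairwise_append.mp (by rwa [List.take_append_drop] : (l.take n ++ l.drop n).Pairwise r)).2.2
  exact this

-- A's needed-fold is the sum over the m largest entries

theorem pvNeededEq (p : Int) (s : List Int) (mN : Nat) (h : mN ≤ s.length) :
    (PySem.List.pyRange 0 (mN : Int) 1).foldl
      (fun acc j => acc + max 0 (p - PySem.List.pyGetD s j 0)) 0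
    = ((s.take mN).map (fun v => max 0 (p - v))).sum := by
  have e1 : (PySem.List.pyRange 0 ((mN : Nat) : Int) 1).foldl
      (fun acc j => acc + max 0 (p - PySem.List.pyGetD s j 0)) 0
      = (PySem.List.pyRange 0 ((mN : Nat) : Int) 1).foldl
      (fun acc j => acc + max 0 (p - PySem.List.pyGetD (s.take mN) j 0)) 0 := by
    apply PySem.List.foldl_congr_mem
    intro acc x hx
    rw [PySem.List.mem_pyRange_one] at hx
    rw [PySem.List.pyGetD_eq_getElem _ _ hx.1 (by omega),
        PySem.List.pyGetD_eq_getElem _ _ hx.1 (by simp; omega)]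
    rw [List.getElem_take]
  rw [e1]
  have hlen_take : (((s.take mN).length : Nat) : Int) = ((mN : Nat) : Int) := by
    simp [h]
  rw [← hlen_take,
    PySem.List.foldl_pyRange_pyGetD' (s.take mN) 0 (fun acc x => acc + max 0 (p - x)) 0 le_rfl]
  simp only [Int.toNat_zero, List.drop_zero]
  rw [PySem.List.foldl_add _ (fun x => max 0 (p - x)) 0, zero_add]

-- B's sum of the m cheapest costs = A's spent-so-far plus A's needed at this bit

theorem pvBSumEq (nums : List Int) (m : Int) (sel others : List (Int × Int × Int))
    (RN : Nat) (n : Nat) (hn : n ≤ 32) (hd : 2^(n+1) ∣ RN)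
    (hm1 : 1 ≤ m) (hmlen : m ≤ (sel.length : Int))
    (hpermN : nums.Perm (sel.map (·.1) ++ others.map (·.1)))
    (hpre : ∀ t ∈ sel ++ others, pvPre ((RN : Nat) : Int) t.1 (n+1) = (t.2.1, t.2.2))
    (hphase : (∀ t ∈ sel, t.2.1 = 0) ∨ (sel.length : Int) = m)
    (hoth : ∀ d ∈ others, 1 ≤ d.2.1 ∧ d.2.2 = 0 ∧ ∀ s ∈ sel, s.2.1 ≤ d.2.1)
    (hvpos : others = [] ∨ ∀ s ∈ sel, 0 ≤ s.2.2) :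
    (PySem.List.slice (PySem.List.sorted
        (nums.map (fun x => pvCost ((RN + 2^n : Nat) : Int) x)) (fun c => c) false)
      none (some m)).sum
    = (sel.map (·.2.1)).sum
      + (((PySem.List.sorted sel (fun t => t.2.2) true).take m.toNat).map
          (fun t => max 0 (((2^n : Nat) : Int) - t.2.2))).sum := by
  set p : Int := ((2^n : Nat) : Int) with hp
  set g : Int × Int × Int → Int := fun t => t.2.1 + max 0 (p - t.2.2) with hg
  set selS := PySem.List.sorted sel (fun t => t.2.2) true with hselS
  have hselSperm : selS.Perm sel := PySem.List.sorted_perm _ _ _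
  have hselSlen : selS.length = sel.length := PySem.List.length_sorted _ _ _
  have hselSmem : ∀ t ∈ selS, t ∈ sel := fun t ht => hselSperm.mem_iff.mp ht
  have mN : Nat := m.toNat
  -- each element's cost is g of its tracked triple
  have hcost : ∀ t ∈ sel ++ others, pvCost ((RN + 2^n : Nat) : Int) t.1 = g t := by
    intro t ht
    rw [pvCost_eval RN n hn hd t.1, hpre t ht]
  -- the cost multiset
  have hperm1 : (nums.map (fun x => pvCost ((RN + 2^n : Nat) : Int) x)).Perm
      ((sel ++ others).map g) := by
    refine (hpermN.map _).trans ?_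
    rw [← List.map_append, List.map_map]
    exact List.Perm.of_eq (List.map_congr_left (fun t ht => hcost t ht))
  have hsortEq : PySem.List.sorted
      (nums.map (fun x => pvCost ((RN + 2^n : Nat) : Int) x)) (fun c => c) false
      = PySem.List.sorted ((sel ++ others).map g) (fun c => c) false :=
    PySem.List.sorted_eq_sorted_of_perm _ _ _ (fun a b hab => hab) hperm1
  have hslice : ∀ L : List Int, PySem.List.slice L none (some m) = L.take m.toNat :=
    fun L => PySem.List.slice_to L (by omega)
  rw [hsortEq, hslice]
  -- cross bound: every selected cost ≤ every dropped cost
  have hcross : ∀ t ∈ sel, ∀ d ∈ others, g t ≤ g d := by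
    intro t ht d hd'
    rcases hvpos with hemp | hvp
    · subst hemp; simp at hd'
    · obtain ⟨hd1, hd2, hd3⟩ := hoth d hd'
      have hvt : 0 ≤ t.2.2 := hvp t ht
      have hp0 : 0 < p := by rw [hp]; positivity
      simp only [hg, hd2]
      have h1 : max 0 (p - t.2.2) ≤ p := by omega
      have h2 : max 0 (p - 0) = p := by omega
      have := hd3 t ht
      omega
  rcases hphase with hph1 | hph2
  · -- phase 1: tracked costs are zero; the m cheapest are the m largest values of sel
    have hgsel : ∀ t ∈ sel, g t = max 0 (p - t.2.2) := by
      intro t ht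
      simp only [hg, hph1 t ht, zero_add]
    have hY : PySem.List.sorted ((sel ++ others).map g) (fun c => c) false
        = selS.map g ++ PySem.List.sorted (others.map g) (fun c => c) false := by
      apply PySem.List.sorted_id_eq_of_perm_of_pairwise
      · refine List.Perm.append ((hselSperm.map g).trans ?_) (PySem.List.sorted_perm _ _ _) |>.trans
          (by rw [List.map_append])|>.symm.symm
        · exact List.Perm.refl _
      · apply List.pairwise_append.mpr
        refine ⟨?_, ?_, ?_⟩
        · rw [List.pairwise_map]
          refine (PySem.List.sorted_pairwise_rev sel (fun t => t.2.2)).imp_of_mem ?_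
          intro a b ha hb hab
          rw [hgsel a (hselSmem a ha), hgsel b (hselSmem b hb)]
          omega
        · exact PySem.List.sorted_pairwise _ _
        · intro a ha b hb
          obtain ⟨t, ht, rfl⟩ := List.mem_map.mp ha
          have hb' : b ∈ others.map g := (PySem.List.sorted_perm _ _ _).mem_iff.mp hb
          obtain ⟨d, hdm, rfl⟩ := List.mem_map.mp hb'
          exact hcross t (hselSmem t ht) d hdm
    rw [hY, List.take_append_of_le_length (by
      rw [List.length_map, hselSlen]; omega)]
    have hzero : (sel.map (·.2.1)).sum = 0 := by
      apply List.sum_eq_zero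
      intro c hc
      obtain ⟨t, ht, rfl⟩ := List.mem_map.mp hc
      exact hph1 t ht
    have htkmap : (selS.map g).take m.toNat
        = (selS.take m.toNat).map (fun t => max 0 (p - t.2.2)) := by
      rw [← List.map_take]
      apply List.map_congr_left
      intro t ht
      exact hgsel t (hselSmem t (List.mem_of_mem_take ht))
    rw [htkmap, hzero, zero_add]
  · -- phase 2: exactly m selected elements; the m cheapest are all of them
    have hY : PySem.List.sorted ((sel ++ others).map g) (fun c => c) false
        = PySem.List.sorted (sel.map g) (fun c => c) false
          ++ PySem.List.sorted (others.map g) (fun c => c) false := by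
      apply PySem.List.sorted_id_eq_of_perm_of_pairwise
      · rw [List.map_append]
        exact List.Perm.append (PySem.List.sorted_perm _ _ _) (PySem.List.sorted_perm _ _ _)
      · apply List.pairwise_append.mpr
        refine ⟨PySem.List.sorted_pairwise _ _, PySem.List.sorted_pairwise _ _, ?_⟩
        intro a ha b hb
        obtain ⟨t, ht, rfl⟩ := List.mem_map.mp ((PySem.List.sorted_perm _ _ _).mem_iff.mp ha)
        obtain ⟨d, hdm, rfl⟩ := List.mem_map.mp ((PySem.List.sorted_perm _ _ _).mem_iff.mp hb)
        exact hcross t ht d hdm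
    rw [hY, List.take_append_of_le_length (by
      rw [PySem.List.length_sorted, List.length_map]; omega)]
    have htk : (PySem.List.sorted (sel.map g) (fun c => c) false).take m.toNat
        = PySem.List.sorted (sel.map g) (fun c => c) false := by
      apply List.take_of_length_le
      rw [PySem.List.length_sorted, List.length_map]
      omega
    rw [htk, List.Perm.sum_eq (PySem.List.sorted_perm _ _ _)]
    have htk2 : selS.take m.toNat = selS := by
      apply List.take_of_length_le
      omega
    rw [htk2]
    have hsum : (sel.map g).sum = (sel.map (·.2.1)).sum + (sel.map (fun t => max 0 (p - t.2.2))).sum := by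
      simp only [hg]
      rw [← PySem.List.sum_map_add_int]
    rw [hsum]
    congr 1
    exact List.Perm.sum_eq ((hselSperm.map _).symm)

theorem pvStep_main (nums : List Int) (k m : Int) (n : Nat) (hn : n ≤ 32)
    (st : List Int × Int × Int) (hInv : pvInv nums k m (n + 1) st) :
    pvInv nums k m n (pvStepA m st (n : Int)) ∧
    (pvStepA m st (n : Int)).2.2 = pvAltStep nums k m st.2.2 (n : Int) := by
  obtain ⟨vals, kr, R⟩ := st
  obtain ⟨sel, others, RN, hR, hRlt, hRdvd, hn33, hpermN, hpermV, hkr, hkr0, hm1, hmlen,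
    hpre, hvlt, hcpos, hphase, hoth, hvpos⟩ := hInv
  simp only at hR hpermV hkr hkr0 ⊢
  subst hR
  simp only [pvStepA, pvAltStep]
  set p : Int := (1:Int) <<< ((n : Int)).toNat with hpdef
  have hpcast : p = ((2^n : Nat) : Int) := by
    rw [hpdef, Int.toNat_natCast]; exact pvPowCast n
  have hp0 : 0 < p := by rw [hpcast]; positivity
  set selS := PySem.List.sorted sel (fun t => t.2.2) true with hselSdef
  have hselSperm : selS.Perm sel := PySem.List.sorted_perm _ _ _
  have hselSlen : selS.length = sel.length := PySem.List.length_sorted _ _ _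
  have hselSsub : ∀ t ∈ selS, t ∈ sel := fun t ht => hselSperm.mem_iff.mp ht
  set s := PySem.List.sorted vals (fun x => x) true with hsdef
  have hsSel : s = selS.map (·.2.2) := pvSortedTriples sel vals hpermV
  have hslen : s.length = sel.length := by rw [hsSel, List.length_map, hselSlen]
  have hspair : s.Pairwise (fun a b => b ≤ a) := PySem.List.sorted_pairwise_rev vals (fun x => x)
  set mN : Nat := m.toNat with hmNdef
  have hmN : m = ((mN : Nat) : Int) := by omega
  have hmNlen : mN ≤ s.length := by omega
  set cN : Nat := s.countP (fun x => decide (p ≤ x)) with hcNdef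
  have hcle : cN ≤ s.length := List.countP_le_length
  obtain ⟨hf1, hf2⟩ := pvDescSplit s p hspair
  have hmem_takeI : ∀ y ∈ s.take cN, p ≤ y := by
    intro y hy; rw [← hf1] at hy; simpa using List.of_mem_filter hy
  have hmem_dropI : ∀ y ∈ s.drop cN, y < p := by
    intro y hy; rw [← hf2] at hy; simpa using List.of_mem_filter hy
  have hTake : s.take cN = (selS.take cN).map (·.2.2) := by rw [hsSel, List.map_take]
  have hDrop : s.drop cN = (selS.drop cN).map (·.2.2) := by rw [hsSel, List.map_drop]
  have hmem_take : ∀ t ∈ selS.take cN, p ≤ t.2.2 := by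
    intro t ht
    exact hmem_takeI _ (hTake ▸ List.mem_map_of_mem ht)
  have hmem_drop : ∀ t ∈ selS.drop cN, t.2.2 < p := by
    intro t ht
    exact hmem_dropI _ (hDrop ▸ List.mem_map_of_mem ht)
  have hvlt2 : ∀ t ∈ sel ++ others, t.2.2 < 2 * p := by
    intro t ht
    have := hvlt t ht
    have h2 : ((2:Int))^(n+1) = 2 * p := by rw [hpcast]; push_cast; ring
    omega
  -- index test
  have hi0 : (0:Int) ≤ m - 1 := by omega
  have hi1 : m - 1 < (s.length : Int) := by omega
  rw [PySem.List.pyGet?_eq_some_getElem s hi0 hi1]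
  simp only [Option.elim]
  have hidxlt : (m - 1).toNat < s.length := by omega
  have htA : p ≤ s[(m - 1).toNat] ↔ mN ≤ cN := by
    rw [pvDescIndex s p hspair _ hidxlt]
    omega
  -- A's needed sum
  have hneedA : (PySem.List.pyRange 0 m 1).foldl
      (fun acc j => acc + max 0 (p - PySem.List.pyGetD s j 0)) 0
      = ((selS.take mN).map (fun t => max 0 (p - t.2.2))).sum := by
    rw [hmN, pvNeededEq p s mN hmNlen, hsSel, ← List.map_take, List.map_map]
    rfl
  set needV : Int := ((selS.take mN).map (fun t => max 0 (p - t.2.2))).sum with hneedVdef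
  -- B's candidate and sum
  have hcand : PySem.Int.bor ((RN : Nat) : Int) p = ((RN + 2^n : Nat) : Int) := by
    obtain ⟨q, hq⟩ := hRdvd
    rw [hpcast, PySem.Int.bor_natCast]
    subst hq
    rw [pvLor_disjoint q n]
  have hBsum : (PySem.List.slice (PySem.List.sorted
        (nums.map (fun x => pvCost (PySem.Int.bor ((RN : Nat) : Int) p) x)) (fun c => c) false)
      none (some m)).sum
      = (sel.map (·.2.1)).sum + needV := by
    rw [hcand, hneedVdef]
    have := pvBSumEq nums m sel others RN n hn hRdvd hm1 hmlen hpermN hpre hphase hoth hvpos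
    rw [this]
    congr 1
    rw [← hselSdef, ← hpcast, ← hmNdef]
  have hBcond : ((PySem.List.slice (PySem.List.sorted
        (nums.map (fun x => pvCost (PySem.Int.bor ((RN : Nat) : Int) p) x)) (fun c => c) false)
      none (some m)).sum ≤ k) ↔ needV ≤ kr := by
    rw [hBsum]
    omega
  -- needed ≥ 0 always
  have hneednn : 0 ≤ needV := by
    apply List.sum_nonneg
    intro a ha
    obtain ⟨t, _, rfl⟩ := List.mem_map.mp ha
    omega
  -- the per-element machine step on accept / reject
  have hpreAcc : ∀ t ∈ sel ++ others, pvPre ((RN + 2^n : Nat) : Int) t.1 n =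
      (if p ≤ t.2.2 then (t.2.1, t.2.2 - p) else (t.2.1 + (p - t.2.2), 0)) := by
    intro t ht
    rw [pvPre_snoc _ _ n hn]
    have hcongr := pvPre_congr RN n hRdvd t.1
    rw [hcongr, hpre t ht, pvCostStep_nat]
    rw [if_pos (by
      rw [PySem.Int.band_natCast, pvBand_add_pow_self RN n hRdvd]
      positivity)]
    rw [← hpcast]
  have hpreRej : ∀ t ∈ sel ++ others, pvPre ((RN : Nat) : Int) t.1 n =
      (t.2.1, PySem.Int.band t.2.2 (p - 1)) := by
    intro t ht
    rw [pvPre_snoc _ _ n hn, hpre t ht, pvCostStep_nat]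
    rw [if_neg (by
      rw [PySem.Int.band_natCast, pvBand_pow_eq_zero_of_lt RN n n hRdvd (le_refl n)]
      simp)]
    rw [← hpcast]
  -- RN + 2^n stays in range and divisible
  have hRN'lt : RN + 2^n < 2^33 := by
    obtain ⟨q, hq⟩ := hRdvd
    have h33 : (2:Nat)^33 = 2^(n+1) * 2^(32-n) := by
      rw [← pow_add]
      congr 1
      omega
    have hq2 : q < 2^(32-n) := by
      by_contra hc
      rw [Nat.not_lt] at hc
      have h5 : 2^(n+1) * 2^(32-n) ≤ 2^(n+1) * q := Nat.mul_le_mul_left _ hc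
      omega
    have h2 : 2^(n+1) * (q+1) ≤ 2^(n+1) * 2^(32-n) := Nat.mul_le_mul_left _ hq2
    have hstep : RN + 2^(n+1) = 2^(n+1)*(q+1) := by rw [hq]; ring
    have h3 : (2:Nat)^n < 2^(n+1) := by
      have h6 : (2:Nat)^(n+1) = 2^n * 2 := by rw [pow_succ]
      have h4 : 0 < (2:Nat)^n := by positivity
      omega
    omega
  have hRN'dvd : 2^n ∣ RN + 2^n :=
    Dvd.dvd.add (dvd_trans (pow_dvd_pow 2 (by omega)) hRdvd) dvd_rfl
  by_cases hge : p ≤ s[(m - 1).toNat]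
  · -- branch 1: the bit is already owned by at least m elements (A's first branch)
    rw [if_pos hge]
    have hcge : mN ≤ cN := htA.mp hge
    have hneed0 : needV = 0 := by
      apply List.sum_eq_zero
      intro a ha
      obtain ⟨t, ht, rfl⟩ := List.mem_map.mp ha
      have hmem2 : t ∈ selS.take cN := by
        have heq : List.take mN (List.take cN selS) = List.take mN selS := by
          rw [List.take_take, min_eq_left hcge]
        rw [← heq] at ht
        exact List.mem_of_mem_take ht
      have := hmem_take t hmem2
      omega
    rw [if_pos (by rw [hBcond, hneed0]; exact hkr0)]
    refine ⟨?_, rfl⟩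
    have hdropnil : (sel.length : Int) = m → selS.drop cN = [] := by
      intro hlm
      apply List.drop_eq_nil_of_le
      omega
    refine ⟨(selS.take cN).map (fun t => (t.1, t.2.1, t.2.2 - p)),
      others.map (fun d => (d.1, d.2.1 + (p - d.2.2), 0))
        ++ (selS.drop cN).map (fun t => (t.1, t.2.1 + (p - t.2.2), 0)),
      RN + 2^n, hcand, hRN'lt, hRN'dvd, by omega, ?_, ?_, ?_, hkr0, hm1, ?_, ?_, ?_, ?_, ?_, ?_, ?_⟩
    · -- the original multiset of inputs
      refine hpermN.trans ?_
      have ha : (List.map (fun t : Int × Int × Int => (t.1, t.2.1, t.2.2 - p)) (selS.take cN)).map (·.1)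
          = (selS.take cN).map (·.1) := by rw [List.map_map]; rfl
      have hb : (List.map (fun d : Int × Int × Int => (d.1, d.2.1 + (p - d.2.2), (0:Int))) others).map (·.1)
          = others.map (·.1) := by rw [List.map_map]; rfl
      have hc' : (List.map (fun t : Int × Int × Int => (t.1, t.2.1 + (p - t.2.2), (0:Int))) (selS.drop cN)).map (·.1)
          = (selS.drop cN).map (·.1) := by rw [List.map_map]; rfl
      rw [List.map_append, ha, hb, hc']
      have hsplit : (sel.map (·.1)).Perm ((selS.take cN).map (·.1) ++ (selS.drop cN).map (·.1)) := by
        rw [← List.map_append, List.take_append_drop]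
        exact (hselSperm.map _).symm
      refine (List.Perm.append hsplit (List.Perm.refl (others.map (·.1)))).trans ?_
      rw [List.append_assoc]
      exact List.Perm.append_left _ List.perm_append_comm
    · -- A's surviving values are the tracked ones
      apply List.Perm.of_eq
      show (s.filter (fun x => decide (p ≤ x))).map (fun x => PySem.Int.band x (p - 1)) = _
      rw [hf1, hTake, List.map_map, List.map_map]
      apply List.map_congr_left
      intro t ht
      show PySem.Int.band t.2.2 (p - 1) = t.2.2 - p
      have h1' := hmem_take t ht
      have h2' := hvlt2 t (List.mem_append_left _ (hselSsub t (List.mem_of_mem_take ht)))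
      have h3' : ((2^(n+1) : Nat) : Int) = 2 * p := by rw [hpcast]; push_cast; ring
      rw [hpcast] at h1' ⊢
      rw [pvBandSub t.2.2 n h1' (by omega)]
    · -- budget bookkeeping
      show kr = k - _
      rw [List.map_map]
      have heq : (List.map ((·.2.1) ∘ fun t : Int × Int × Int => (t.1, t.2.1, t.2.2 - p)) (selS.take cN))
          = (selS.take cN).map (·.2.1) := rfl
      rw [heq]
      rcases hphase with hph1 | hph2
      · have hz1 : ((selS.take cN).map (·.2.1)).sum = 0 := by
          apply List.sum_eq_zero
          intro c hc
          obtain ⟨u, hu, rfl⟩ := List.mem_map.mp hc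
          exact hph1 u (hselSsub u (List.mem_of_mem_take hu))
        have hz2 : (sel.map (·.2.1)).sum = 0 := by
          apply List.sum_eq_zero
          intro c hc
          obtain ⟨u, hu, rfl⟩ := List.mem_map.mp hc
          exact hph1 u hu
        omega
      · have htk : selS.take cN = selS := List.take_of_length_le (by omega)
        rw [htk]
        have : (selS.map (·.2.1)).sum = (sel.map (·.2.1)).sum :=
          List.Perm.sum_eq (hselSperm.map _)
        omega
    · -- still at least m selected
      show m ≤ _
      rw [List.length_map, List.length_take, min_eq_left (show cN ≤ selS.length by rw [hselSlen]; omega)]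
      have : (mN : Int) ≤ (cN : Int) := by exact_mod_cast hcge
      omega
    · -- tracked machine states advance correctly
      intro t ht
      rcases List.mem_append.mp ht with hl | hr
      · obtain ⟨u, hu, rfl⟩ := List.mem_map.mp hl
        have := hpreAcc u (List.mem_append_left _ (hselSsub u (List.mem_of_mem_take hu)))
        rw [this, if_pos (hmem_take u hu)]
      · rcases List.mem_append.mp hr with h1' | h2'
        · obtain ⟨d, hd', rfl⟩ := List.mem_map.mp h1'
          have := hpreAcc d (List.mem_append_right _ hd')
          rw [this, if_neg (by rw [(hoth d hd').2.1]; omega)]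
        · obtain ⟨u, hu, rfl⟩ := List.mem_map.mp h2'
          have := hpreAcc u (List.mem_append_left _ (hselSsub u (List.mem_of_mem_drop hu)))
          rw [this, if_neg (by have := hmem_drop u hu; omega)]
    · -- value bounds
      intro t ht
      have hpc2 : ((2:Int))^n = p := by rw [hpcast]; push_cast; ring
      rcases List.mem_append.mp ht with hl | hr
      · obtain ⟨u, hu, rfl⟩ := List.mem_map.mp hl
        have h2' := hvlt2 u (List.mem_append_left _ (hselSsub u (List.mem_of_mem_take hu)))
        show u.2.2 - p < (2:Int)^n
        omega
      · rcases List.mem_append.mp hr with h1' | h2'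
        · obtain ⟨d, hd', rfl⟩ := List.mem_map.mp h1'
          show (0:Int) < (2:Int)^n
          positivity
        · obtain ⟨u, hu, rfl⟩ := List.mem_map.mp h2'
          show (0:Int) < (2:Int)^n
          positivity
    · -- cost nonnegativity
      intro t ht
      rcases List.mem_append.mp ht with hl | hr
      · obtain ⟨u, hu, rfl⟩ := List.mem_map.mp hl
        exact hcpos u (List.mem_append_left _ (hselSsub u (List.mem_of_mem_take hu)))
      · rcases List.mem_append.mp hr with h1' | h2'
        · obtain ⟨d, hd', rfl⟩ := List.mem_map.mp h1'
          have hc' := hcpos d (List.mem_append_right _ hd')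
          have hv' := (hoth d hd').2.1
          show 0 ≤ d.2.1 + (p - d.2.2)
          omega
        · obtain ⟨u, hu, rfl⟩ := List.mem_map.mp h2'
          have hc' := hcpos u (List.mem_append_left _ (hselSsub u (List.mem_of_mem_drop hu)))
          have hv' := hmem_drop u hu
          show 0 ≤ u.2.1 + (p - u.2.2)
          omega
    · -- phase is preserved
      rcases hphase with hph1 | hph2
      · left
        intro t ht
        obtain ⟨u, hu, rfl⟩ := List.mem_map.mp ht
        exact hph1 u (hselSsub u (List.mem_of_mem_take hu))
      · right
        rw [List.length_map, List.length_take, min_eq_left (by omega)]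
        omega
    · -- dropped elements stay dominated
      intro d' hd'
      rcases List.mem_append.mp hd' with h1' | h2'
      · obtain ⟨d, hdm, rfl⟩ := List.mem_map.mp h1'
        obtain ⟨hg1, hg2, hg3⟩ := hoth d hdm
        refine ⟨by show 1 ≤ d.2.1 + (p - d.2.2); omega, rfl, ?_⟩
        intro t ht
        obtain ⟨u, hu, rfl⟩ := List.mem_map.mp ht
        have := hg3 u (hselSsub u (List.mem_of_mem_take hu))
        show u.2.1 ≤ d.2.1 + (p - d.2.2)
        omega
      · obtain ⟨u, hu, rfl⟩ := List.mem_map.mp h2'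
        have hvu := hmem_drop u hu
        have hcu := hcpos u (List.mem_append_left _ (hselSsub u (List.mem_of_mem_drop hu)))
        refine ⟨by show 1 ≤ u.2.1 + (p - u.2.2); omega, rfl, ?_⟩
        intro t ht
        obtain ⟨w, hw, rfl⟩ := List.mem_map.mp ht
        show w.2.1 ≤ u.2.1 + (p - u.2.2)
        rcases hphase with hph1 | hph2
        · have := hph1 w (hselSsub w (List.mem_of_mem_take hw))
          omega
        · rw [hdropnil hph2] at hu
          simp at hu
    · -- all selected values are now nonnegative
      right
      intro t ht
      obtain ⟨u, hu, rfl⟩ := List.mem_map.mp ht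
      have := hmem_take u hu
      show 0 ≤ u.2.2 - p
      omega
  · -- A's else part
    rw [if_neg hge]
    have hclt : ¬ mN ≤ cN := fun h => hge (htA.mpr h)
    rw [hneedA]
    by_cases hkneed : needV ≤ kr
    · -- branch 2: buy the bit by boosting
      rw [if_pos hkneed, if_pos (hBcond.mpr hkneed)]
      refine ⟨?_, rfl⟩
      have hpc2 : ((2:Int))^n = p := by rw [hpcast]; push_cast; ring
      have hcNle : cN ≤ selS.length := by rw [hselSlen]; omega
      have hmNle : mN ≤ selS.length := by rw [hselSlen]; omega
      have hmidlen : ((selS.drop cN).take (mN - cN)).length = mN - cN := by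
        rw [List.length_take, List.length_drop, min_eq_left (by omega)]
      -- A's boost loop output
      have hfold : (PySem.List.pyRange 0 m 1).foldl
          (fun ns j => if PySem.List.pyGetD ns j 0 < p then PySem.List.pySetD ns j p else ns) s
          = (s.take mN).map (fun x => if x < p then p else x) ++ s.drop mN := by
        rw [hmN]
        exact pvBoostEq p s mN hmNlen
      have htksplit : s.take mN = s.take cN ++ (s.drop cN).take (mN - cN) := by
        conv_lhs => rw [show mN = cN + (mN - cN) by omega]
        exact List.take_add
      have hmapU : (s.take mN).map (fun x => if x < p then p else x)
          = s.take cN ++ List.replicate (mN - cN) p := by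
        rw [htksplit, List.map_append]
        congr 1
        · rw [List.map_congr_left (fun x hx => if_neg (not_lt.mpr (hmem_takeI x hx))), List.map_id']
        · rw [List.eq_replicate_iff]
          refine ⟨by rw [List.length_map, List.length_take, List.length_drop, min_eq_left (by omega)], ?_⟩
          intro b hb
          obtain ⟨y, hy, rfl⟩ := List.mem_map.mp hb
          exact if_pos (hmem_dropI y (List.mem_of_mem_take hy))
      have hdropmN : s.drop mN = (s.drop cN).drop (mN - cN) := by
        rw [List.drop_drop]
        congr 1
        omega
      have hfilter : (((s.take cN ++ List.replicate (mN - cN) p) ++ s.drop mN).filter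
          (fun x => decide (p ≤ x))) = s.take cN ++ List.replicate (mN - cN) p := by
        rw [List.filter_append, List.filter_append]
        rw [List.filter_eq_self.mpr (fun x hx => by simpa using hmem_takeI x hx)]
        rw [List.filter_eq_self.mpr (fun x hx => by
          simp [List.eq_of_mem_replicate hx])]
        rw [List.filter_eq_nil_iff.mpr (fun x hx => by
          rw [hdropmN] at hx
          simpa using not_le.mpr (hmem_dropI x (List.mem_of_mem_drop hx)))]
        simp
      have hbandp : PySem.Int.band p (p - 1) = 0 := by
        rw [← hpc2]; exact pvBandPow n
      -- the dropped tail is empty in phase 2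
      have hdropnil2 : (sel.length : Int) = m → (selS.drop cN).drop (mN - cN) = [] := by
        intro hlm
        apply List.drop_eq_nil_of_le
        rw [List.length_drop]
        omega
      -- needed splits into zero on the owners and full on the boosted
      have hneedsplit : needV = (((selS.drop cN).take (mN - cN)).map (fun t => p - t.2.2)).sum := by
        rw [hneedVdef]
        have h1' : selS.take mN = selS.take cN ++ (selS.drop cN).take (mN - cN) := by
          conv_lhs => rw [show mN = cN + (mN - cN) by omega]
          exact List.take_add
        rw [h1', List.map_append, List.sum_append]
        have hz : ((selS.take cN).map (fun t => max 0 (p - t.2.2))).sum = 0 := by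
          apply List.sum_eq_zero
          intro a ha
          obtain ⟨u, hu, rfl⟩ := List.mem_map.mp ha
          have := hmem_take u hu
          omega
        rw [hz, zero_add]
        apply congrArg
        apply List.map_congr_left
        intro u hu
        have := hmem_drop u (List.mem_of_mem_take hu)
        omega
      refine ⟨(selS.take cN).map (fun t => (t.1, t.2.1, t.2.2 - p))
          ++ ((selS.drop cN).take (mN - cN)).map (fun t => (t.1, t.2.1 + (p - t.2.2), 0)),
        others.map (fun d => (d.1, d.2.1 + (p - d.2.2), 0))
          ++ ((selS.drop cN).drop (mN - cN)).map (fun t => (t.1, t.2.1 + (p - t.2.2), 0)),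
        RN + 2^n, hcand, hRN'lt, hRN'dvd, by omega, ?_, ?_, ?_, by simp only; omega, hm1, ?_, ?_, ?_, ?_, ?_, ?_, ?_⟩
      · -- the original multiset of inputs
        refine hpermN.trans ?_
        have e1 : (List.map (fun t : Int × Int × Int => (t.1, t.2.1, t.2.2 - p)) (selS.take cN)).map (·.1)
            = (selS.take cN).map (·.1) := by rw [List.map_map]; rfl
        have e2 : (List.map (fun t : Int × Int × Int => (t.1, t.2.1 + (p - t.2.2), (0:Int))) ((selS.drop cN).take (mN - cN))).map (·.1)
            = ((selS.drop cN).take (mN - cN)).map (·.1) := by rw [List.map_map]; rfl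
        have e3 : (List.map (fun d : Int × Int × Int => (d.1, d.2.1 + (p - d.2.2), (0:Int))) others).map (·.1)
            = others.map (·.1) := by rw [List.map_map]; rfl
        have e4 : (List.map (fun t : Int × Int × Int => (t.1, t.2.1 + (p - t.2.2), (0:Int))) ((selS.drop cN).drop (mN - cN))).map (·.1)
            = ((selS.drop cN).drop (mN - cN)).map (·.1) := by rw [List.map_map]; rfl
        rw [List.map_append, List.map_append, e1, e2, e3, e4]
        have hsplit : (sel.map (·.1)).Perm
            (((selS.take cN).map (·.1) ++ ((selS.drop cN).take (mN - cN)).map (·.1))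
              ++ ((selS.drop cN).drop (mN - cN)).map (·.1)) := by
          rw [List.append_assoc, ← List.map_append, List.take_append_drop,
              ← List.map_append, List.take_append_drop]
          exact (hselSperm.map _).symm
        refine (List.Perm.append hsplit (List.Perm.refl (others.map (·.1)))).trans ?_
        simp only [List.append_assoc]
        exact List.Perm.append_left _ (List.Perm.append_left _ List.perm_append_comm)
      · -- A's surviving values are the tracked ones
        apply List.Perm.of_eq
        show ((List.foldl _ s _).filter (fun x => decide (p ≤ x))).map (fun x => PySem.Int.band x (p - 1)) = _
        rw [hfold, hmapU, hfilter, List.map_append, List.map_append, List.map_map, List.map_map]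
        congr 1
        · rw [hTake, List.map_map]
          apply List.map_congr_left
          intro t ht
          show PySem.Int.band t.2.2 (p - 1) = t.2.2 - p
          have h1' := hmem_take t ht
          have h2' := hvlt2 t (List.mem_append_left _ (hselSsub t (List.mem_of_mem_take ht)))
          have h3' : ((2^(n+1) : Nat) : Int) = 2 * p := by rw [hpcast]; push_cast; ring
          rw [hpcast] at h1' ⊢
          rw [pvBandSub t.2.2 n h1' (by omega)]
        · rw [List.map_replicate, hbandp]
          have : (List.map ((fun t : Int × Int × Int => t.2.2) ∘ fun t : Int × Int × Int => (t.1, t.2.1 + (p - t.2.2), (0:Int))) ((selS.drop cN).take (mN - cN)))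
              = List.map (fun _ => (0:Int)) ((selS.drop cN).take (mN - cN)) := rfl
          rw [this, List.map_const', hmidlen]
      · -- budget bookkeeping
        show kr - needV = k - _
        rw [List.map_append, List.sum_append, List.map_map, List.map_map]
        have e1 : (List.map ((·.2.1) ∘ fun t : Int × Int × Int => (t.1, t.2.1, t.2.2 - p)) (selS.take cN))
            = (selS.take cN).map (·.2.1) := rfl
        have e2 : (List.map ((·.2.1) ∘ fun t : Int × Int × Int => (t.1, t.2.1 + (p - t.2.2), (0:Int))) ((selS.drop cN).take (mN - cN)))
            = ((selS.drop cN).take (mN - cN)).map (fun t => t.2.1 + (p - t.2.2)) := rfl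
        rw [e1, e2]
        have hsum2 : (((selS.drop cN).take (mN - cN)).map (fun t => t.2.1 + (p - t.2.2))).sum
            = (((selS.drop cN).take (mN - cN)).map (·.2.1)).sum
              + (((selS.drop cN).take (mN - cN)).map (fun t => p - t.2.2)).sum := by
          rw [← PySem.List.sum_map_add_int]
        rw [hsum2, ← hneedsplit]
        rcases hphase with hph1 | hph2
        · have hz1 : ((selS.take cN).map (·.2.1)).sum = 0 := by
            apply List.sum_eq_zero
            intro a ha
            obtain ⟨u, hu, rfl⟩ := List.mem_map.mp ha
            exact hph1 u (hselSsub u (List.mem_of_mem_take hu))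
          have hz2 : (((selS.drop cN).take (mN - cN)).map (·.2.1)).sum = 0 := by
            apply List.sum_eq_zero
            intro a ha
            obtain ⟨u, hu, rfl⟩ := List.mem_map.mp ha
            exact hph1 u (hselSsub u (List.mem_of_mem_drop (List.mem_of_mem_take hu)))
          have hz3 : (sel.map (·.2.1)).sum = 0 := by
            apply List.sum_eq_zero
            intro a ha
            obtain ⟨u, hu, rfl⟩ := List.mem_map.mp ha
            exact hph1 u hu
          omega
        · have htkmid : (selS.drop cN).take (mN - cN) = selS.drop cN := by
            apply List.take_of_length_le
            rw [List.length_drop]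
            omega
          rw [htkmid]
          have hsplitsum : ((selS.take cN).map (·.2.1)).sum + ((selS.drop cN).map (·.2.1)).sum
              = (sel.map (·.2.1)).sum := by
            rw [← List.sum_append, ← List.map_append, List.take_append_drop]
            exact List.Perm.sum_eq (hselSperm.map _)
          omega
      · -- exactly m selected now
        show m ≤ _
        rw [List.length_append, List.length_map, List.length_map, List.length_take,
            min_eq_left hcNle, hmidlen]
        omega
      · -- tracked machine states advance correctly
        intro t ht
        rcases List.mem_append.mp ht with hl | hr
        · rcases List.mem_append.mp hl with h1' | h2'
          · obtain ⟨u, hu, rfl⟩ := List.mem_map.mp h1'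
            have := hpreAcc u (List.mem_append_left _ (hselSsub u (List.mem_of_mem_take hu)))
            rw [this, if_pos (hmem_take u hu)]
          · obtain ⟨u, hu, rfl⟩ := List.mem_map.mp h2'
            have := hpreAcc u (List.mem_append_left _ (hselSsub u (List.mem_of_mem_drop (List.mem_of_mem_take hu))))
            rw [this, if_neg (by have := hmem_drop u (List.mem_of_mem_take hu); omega)]
        · rcases List.mem_append.mp hr with h1' | h2'
          · obtain ⟨d, hd', rfl⟩ := List.mem_map.mp h1'
            have := hpreAcc d (List.mem_append_right _ hd')
            rw [this, if_neg (by rw [(hoth d hd').2.1]; omega)]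
          · obtain ⟨u, hu, rfl⟩ := List.mem_map.mp h2'
            have := hpreAcc u (List.mem_append_left _ (hselSsub u (List.mem_of_mem_drop (List.mem_of_mem_drop hu))))
            rw [this, if_neg (by have := hmem_drop u (List.mem_of_mem_drop hu); omega)]
      · -- value bounds
        intro t ht
        rcases List.mem_append.mp ht with hl | hr
        · rcases List.mem_append.mp hl with h1' | h2'
          · obtain ⟨u, hu, rfl⟩ := List.mem_map.mp h1'
            have h2' := hvlt2 u (List.mem_append_left _ (hselSsub u (List.mem_of_mem_take hu)))
            show u.2.2 - p < (2:Int)^n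
            omega
          · obtain ⟨u, hu, rfl⟩ := List.mem_map.mp h2'
            show (0:Int) < (2:Int)^n
            positivity
        · rcases List.mem_append.mp hr with h1' | h2' <;>
          · first
            | (obtain ⟨d, hd', rfl⟩ := List.mem_map.mp h1'
               show (0:Int) < (2:Int)^n
               positivity)
            | (obtain ⟨u, hu, rfl⟩ := List.mem_map.mp h2'
               show (0:Int) < (2:Int)^n
               positivity)
      · -- cost nonnegativity
        intro t ht
        rcases List.mem_append.mp ht with hl | hr
        · rcases List.mem_append.mp hl with h1' | h2'
          · obtain ⟨u, hu, rfl⟩ := List.mem_map.mp h1'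
            exact hcpos u (List.mem_append_left _ (hselSsub u (List.mem_of_mem_take hu)))
          · obtain ⟨u, hu, rfl⟩ := List.mem_map.mp h2'
            have hc' := hcpos u (List.mem_append_left _ (hselSsub u (List.mem_of_mem_drop (List.mem_of_mem_take hu))))
            have hv' := hmem_drop u (List.mem_of_mem_take hu)
            show 0 ≤ u.2.1 + (p - u.2.2)
            omega
        · rcases List.mem_append.mp hr with h1' | h2'
          · obtain ⟨d, hd', rfl⟩ := List.mem_map.mp h1'
            have hc' := hcpos d (List.mem_append_right _ hd')
            have hv' := (hoth d hd').2.1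
            show 0 ≤ d.2.1 + (p - d.2.2)
            omega
          · obtain ⟨u, hu, rfl⟩ := List.mem_map.mp h2'
            have hc' := hcpos u (List.mem_append_left _ (hselSsub u (List.mem_of_mem_drop (List.mem_of_mem_drop hu))))
            have hv' := hmem_drop u (List.mem_of_mem_drop hu)
            show 0 ≤ u.2.1 + (p - u.2.2)
            omega
      · -- phase: exactly m selected
        right
        rw [List.length_append, List.length_map, List.length_map, List.length_take,
            min_eq_left hcNle, hmidlen]
        omega
      · -- dropped elements stay dominated
        intro d' hd'
        rcases List.mem_append.mp hd' with h1' | h2'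
        · obtain ⟨d, hdm, rfl⟩ := List.mem_map.mp h1'
          obtain ⟨hg1, hg2, hg3⟩ := hoth d hdm
          refine ⟨by show 1 ≤ d.2.1 + (p - d.2.2); omega, rfl, ?_⟩
          intro t ht
          have hvp : ∀ u ∈ sel, 0 ≤ u.2.2 := by
            rcases hvpos with hemp | hvp'
            · subst hemp; simp at hdm
            · exact hvp'
          rcases List.mem_append.mp ht with ha' | hb'
          · obtain ⟨u, hu, rfl⟩ := List.mem_map.mp ha'
            have := hg3 u (hselSsub u (List.mem_of_mem_take hu))
            show u.2.1 ≤ d.2.1 + (p - d.2.2)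
            omega
          · obtain ⟨u, hu, rfl⟩ := List.mem_map.mp hb'
            have h4' := hg3 u (hselSsub u (List.mem_of_mem_drop (List.mem_of_mem_take hu)))
            have h5' := hvp u (hselSsub u (List.mem_of_mem_drop (List.mem_of_mem_take hu)))
            show u.2.1 + (p - u.2.2) ≤ d.2.1 + (p - d.2.2)
            omega
        · obtain ⟨w, hw, rfl⟩ := List.mem_map.mp h2'
          have hvw := hmem_drop w (List.mem_of_mem_drop hw)
          have hcw := hcpos w (List.mem_append_left _ (hselSsub w (List.mem_of_mem_drop (List.mem_of_mem_drop hw))))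
          refine ⟨by show 1 ≤ w.2.1 + (p - w.2.2); omega, rfl, ?_⟩
          intro t ht
          rcases hphase with hph1 | hph2
          · rcases List.mem_append.mp ht with ha' | hb'
            · obtain ⟨u, hu, rfl⟩ := List.mem_map.mp ha'
              have := hph1 u (hselSsub u (List.mem_of_mem_take hu))
              show u.2.1 ≤ w.2.1 + (p - w.2.2)
              have hcw0 := hph1 w (hselSsub w (List.mem_of_mem_drop (List.mem_of_mem_drop hw)))
              omega
            · obtain ⟨u, hu, rfl⟩ := List.mem_map.mp hb'
              have hu0 := hph1 u (hselSsub u (List.mem_of_mem_drop (List.mem_of_mem_take hu)))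
              have hw0 := hph1 w (hselSsub w (List.mem_of_mem_drop (List.mem_of_mem_drop hw)))
              show u.2.1 + (p - u.2.2) ≤ w.2.1 + (p - w.2.2)
              have hpair2 : w.2.2 ≤ u.2.2 := by
                have hdp : (selS.drop cN).Pairwise (fun a b => b.2.2 ≤ a.2.2) :=
                  (PySem.List.sorted_pairwise_rev sel (fun t => t.2.2)).drop
                exact pvPairwiseTakeDrop (selS.drop cN) (mN - cN) hdp u hu w hw
              omega
          · rw [hdropnil2 hph2] at hw
            simp at hw
      · -- all selected values are now nonnegative
        right
        intro t ht
        rcases List.mem_append.mp ht with hl | hr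
        · obtain ⟨u, hu, rfl⟩ := List.mem_map.mp hl
          have := hmem_take u hu
          show 0 ≤ u.2.2 - p
          omega
        · obtain ⟨u, hu, rfl⟩ := List.mem_map.mp hr
          show (0:Int) ≤ 0
          exact le_refl 0
    · -- branch 3: the bit is rejected
      rw [if_neg hkneed, if_neg (fun h => hkneed (hBcond.mp h))]
      refine ⟨?_, rfl⟩
      have hband0 : PySem.Int.band 0 (p - 1) = 0 := by
        rw [PySem.Int.band_comm]; simp
      refine ⟨selS.map (fun t => (t.1, t.2.1, PySem.Int.band t.2.2 (p - 1))), others, RN,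
        rfl, hRlt, dvd_trans (pow_dvd_pow 2 (by omega)) hRdvd, by omega, ?_, ?_, ?_,
        hkr0, hm1, ?_, ?_, ?_, ?_, ?_, ?_, ?_⟩
      · refine hpermN.trans (List.Perm.append ?_ (List.Perm.refl _))
        rw [List.map_map]
        exact (hselSperm.map _).symm
      · apply List.Perm.of_eq
        show List.map (fun x => PySem.Int.band x (p - 1)) s = _
        rw [List.map_map, hsSel, List.map_map]
        rfl
      · show kr = k - _
        rw [List.map_map]
        have : (selS.map (fun t => t.2.1)).sum = (sel.map (·.2.1)).sum :=
          List.Perm.sum_eq (hselSperm.map _)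
        rw [show (List.map ((fun t => t.2.1) ∘ (fun t : Int × Int × Int => (t.1, t.2.1, PySem.Int.band t.2.2 (p - 1)))) selS) = selS.map (fun t => t.2.1) from rfl]
        omega
      · show m ≤ _
        rw [List.length_map, hselSlen]
        omega
      · intro t ht
        rcases List.mem_append.mp ht with hl | hr
        · obtain ⟨u, hu, rfl⟩ := List.mem_map.mp hl
          exact hpreRej u (List.mem_append_left _ (hselSsub u hu))
        · have := hpreRej t (List.mem_append_right _ hr)
          rw [this, (hoth t hr).2.1, hband0]
      · intro t ht
        rcases List.mem_append.mp ht with hl | hr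
        · obtain ⟨u, hu, rfl⟩ := List.mem_map.mp hl
          show PySem.Int.band u.2.2 (p - 1) < (2:Int)^n
          have := (pvBandLe u.2.2 n).2
          rw [← hpcast] at this
          have hpc2 : ((2:Int))^n = p := by rw [hpcast]; push_cast; ring
          omega
        · rw [(hoth t hr).2.1]
          positivity
      · intro t ht
        rcases List.mem_append.mp ht with hl | hr
        · obtain ⟨u, hu, rfl⟩ := List.mem_map.mp hl
          exact hcpos u (List.mem_append_left _ (hselSsub u hu))
        · exact hcpos t (List.mem_append_right _ hr)
      · rcases hphase with hph1 | hph2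
        · left
          intro t ht
          obtain ⟨u, hu, rfl⟩ := List.mem_map.mp ht
          exact hph1 u (hselSsub u hu)
        · right
          rw [List.length_map, hselSlen]
          exact hph2
      · intro d hd'
        obtain ⟨h1', h2', h3'⟩ := hoth d hd'
        refine ⟨h1', h2', ?_⟩
        intro t ht
        obtain ⟨u, hu, rfl⟩ := List.mem_map.mp ht
        exact h3' u (hselSsub u hu)
      · right
        intro t ht
        obtain ⟨u, hu, rfl⟩ := List.mem_map.mp ht
        exact (pvBandLe u.2.2 n).1.trans_eq (by rw [← hpcast])

theorem pvFold_main (nums : List Int) (k m : Int) (n : Nat) (st : List Int × Int × Int)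
    (hInv : pvInv nums k m n st) :
    ((revBits n).foldl (fun s i => pvStepA m s i) st).2.2 =
      (revBits n).foldl (fun ret i => pvAltStep nums k m ret i) st.2.2 := by
  induction n generalizing st with
  | zero => rw [pvRevBits_zero]; simp
  | succ n ih =>
    obtain ⟨h1, h2⟩ := pvStep_main nums k m n (by
      obtain ⟨_, _, _, _, _, _, h33, _⟩ := hInv
      omega) st hInv
    rw [pvRevBits_succ]
    simp only [List.foldl_cons]
    rw [ih _ h1, h2]

theorem pvInv_init (nums : List Int) (k m : Int)
    (hdom : Dom_maximumAND nums k m) (hpre : Pre_maximumAND nums k m) :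
    pvInv nums k m 33 (nums, k, 0) := by
  obtain ⟨hne, hm1, hml, hk⟩ := hpre
  unfold Dom_maximumAND at hdom
  simp only [Bool.and_eq_true] at hdom
  refine ⟨nums.map (fun x => (x, 0, x)), [], 0, rfl, by norm_num, ⟨0, rfl⟩, le_refl _,
    ?_, ?_, ?_, hk, hm1, ?_, ?_, ?_, ?_, Or.inl ?_, by simp, Or.inl rfl⟩
  · simp [List.map_map, Function.comp_def]
  · simp [List.map_map, Function.comp_def]
  · simp [List.map_map, Function.comp_def]
  · simpa using hml
  · intro t ht
    simp only [List.append_nil, List.mem_map] at ht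
    obtain ⟨x, hx, rfl⟩ := ht
    have : aboveBits 33 = [] := by
      unfold aboveBits
      rw [PySem.List.pyRange_neg_one_eq_nil (by norm_num)]
    simp [pvPre, this]
  · intro t ht
    simp only [List.append_nil, List.mem_map] at ht
    obtain ⟨x, hx, rfl⟩ := ht
    have := List.all_eq_true.mp hdom.1.1 x hx
    simp only [pvDomInt, decide_eq_true_eq] at this
    show x < 2 ^ 33
    omega
  · intro t ht
    simp only [List.append_nil, List.mem_map] at ht
    obtain ⟨x, hx, rfl⟩ := ht
    simp
  · intro t ht
    simp only [List.mem_map] at ht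
    obtain ⟨x, hx, rfl⟩ := ht
    simp

-- ===== VERDICT (by name: the statement is the Claim_ definition above) =====
theorem maximumAND_spec : Claim_equal_maximumAND := by
  intro nums k m hdom hpre
  obtain ⟨hne, hm1, hml, hk0⟩ := hpre
  unfold Spec_maximumAND maximumAND maximumAND_alt
  rw [if_neg (show ¬ (nums = [] ∨ m < 1 ∨ (nums.length : Int) < m ∨ k < 0) from by
    simp only [not_or, not_lt]
    exact ⟨hne, by omega, by omega, by omega⟩)]
  have hL : PySem.List.pyRange 32 (-1) (-1) = revBits 33 := by
    norm_num [revBits]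
  simp only [hL]
  exact pvFold_main nums k m 33 (nums, k, 0)
    (pvInv_init nums k m hdom ⟨hne, hm1, hml, hk0⟩)
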